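-- pv_equiv track=rewrite | github.com/nivan/caminhosDiagonais | treeToDotFile.py | partitionToStr
-- ===== SOURCE A (Python) =====
-- def partitionToStr(prt):
--     left = []
--     right = []
--     for key in prt:
--         if prt[key] == 0:
--             left.append(key)
--         else:
--             right.append(key)
--
--     left.sort()
--     right.sort()
--     return ",".join(left) + " | " + ",".join(right)
-- ===== SOURCE B (Python) =====
-- def _merge(a, b):
--     out = []
--     i = j = 0
--     while i < len(a) and j < len(b):
--         if b[j] < a[i]:
--             out.append(b[j]); j += 1
--         else:
--             out.append(a[i]); i += 1
--     return out + a[i:] + b[j:]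
--
-- def _groups(items):
--     # divide and conquer: returns (sorted keys with value 0, sorted keys with value != 0)
--     if not items:
--         return [], []
--     if len(items) == 1:
--         k, v = items[0]
--         return ([k], []) if v == 0 else ([], [k])
--     mid = len(items) // 2
--     l0, l1 = _groups(items[:mid])
--     r0, r1 = _groups(items[mid:])
--     return _merge(l0, r0), _merge(l1, r1)
--
-- def partitionToStr(prt):
--     left, right = _groups(list(prt.items()))
--     return ",".join(left) + " | " + ",".join(right)
-- ===== Notes on version B (the rewrite author's own statement) =====
-- stated objective: alternative
-- what changed: B replaces A's partition-loop-then-two-.sort()-calls by a single hand-written divide-and-conquer pass: a fused merge sort over the items that splits the list in half, recurses, and merges the zero-valued and nonzero-valued key groups separately, producing both sorted groups at once with no call to sort().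
import Mathlib
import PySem

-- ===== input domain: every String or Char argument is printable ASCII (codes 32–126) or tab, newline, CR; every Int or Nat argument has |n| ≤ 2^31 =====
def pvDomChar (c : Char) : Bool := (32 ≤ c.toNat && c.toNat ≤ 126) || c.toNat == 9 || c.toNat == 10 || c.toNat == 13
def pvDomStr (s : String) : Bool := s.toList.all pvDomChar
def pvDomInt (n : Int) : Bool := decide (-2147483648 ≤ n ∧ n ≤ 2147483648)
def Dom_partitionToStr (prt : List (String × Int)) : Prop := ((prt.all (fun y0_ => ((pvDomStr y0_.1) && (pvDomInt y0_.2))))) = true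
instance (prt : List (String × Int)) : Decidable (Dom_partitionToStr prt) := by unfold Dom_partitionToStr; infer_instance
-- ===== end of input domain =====

-- B replaces A's partition-loop-then-two-sorts by one fused divide-and-conquer (hand-written
-- merge sort) that computes both sorted groups at once; objective: alternative algorithm.

-- ===== PORT A =====
-- A: one loop over the dict's keys appending to left/right by value, then sort each, then join.
def partitionToStr (prt : List (String × Int)) : String :=
  let lr := prt.foldl
    (fun (acc : List String × List String) kv =>
      if PySem.Dict.getD (PySem.Dict.ofList prt) kv.1 (0 : Int) == 0 then (acc.1 ++ [kv.1], acc.2)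
      else (acc.1, acc.2 ++ [kv.1]))
    ([], [])
  let left := PySem.List.sorted lr.1 (fun x => x) false
  let right := PySem.List.sorted lr.2 (fun x => x) false
  PySem.Str.join "," left ++ " | " ++ PySem.Str.join "," right

-- ===== PORT B =====
-- _merge: the while loop taking the smaller head (ties from the first list), then the leftovers.
def pvMerge : List String → List String → List String
  | [], b => b
  | x :: xs, [] => x :: xs
  | x :: xs, y :: ys => if y < x then y :: pvMerge (x :: xs) ys else x :: pvMerge xs (y :: ys)

-- _groups: split the items in half, recurse, merge the zero groups and the nonzero groups.
def pvGroups : List (String × Int) → List String × List String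
  | [] => ([], [])
  | [kv] => if kv.2 == 0 then ([kv.1], []) else ([], [kv.1])
  | a :: b :: rest =>
      let items := a :: b :: rest
      let mid := items.length / 2
      let l := pvGroups (items.take mid)
      let r := pvGroups (items.drop mid)
      (pvMerge l.1 r.1, pvMerge l.2 r.2)
termination_by items => items.length
decreasing_by
  · simp; omega
  · simp; omega

def partitionToStr_alt (prt : List (String × Int)) : String :=
  let lr := pvGroups prt
  PySem.Str.join "," lr.1 ++ " | " ++ PySem.Str.join "," lr.2

-- ===== PRECONDITION & SPEC =====
-- Pre_: the association list models a Python dict, so its keys are pairwise distinct;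
-- a duplicate-key list is not the image of any dict input A can receive.
def Pre_partitionToStr (prt : List (String × Int)) : Prop := (prt.map Prod.fst).Nodup
instance (prt : List (String × Int)) : Decidable (Pre_partitionToStr prt) := by unfold Pre_partitionToStr; infer_instance
def pvWitness_partitionToStr : (List (String × Int)) := [("b", 1), ("a", 0), ("c", 0)]

def Spec_partitionToStr (prt : List (String × Int)) (out : String) : Prop := out = partitionToStr_alt prt
instance (prt : List (String × Int)) (out : String) : Decidable (Spec_partitionToStr prt out) := by unfold Spec_partitionToStr; infer_instance

-- ===== CLAIM (what is proved, stated in full; the proofs are below) =====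
def Claim_equal_partitionToStr : Prop := ∀ (prt : List (String × Int)), Dom_partitionToStr prt → Pre_partitionToStr prt → Spec_partitionToStr prt (partitionToStr prt)

-- ===== LEMMAS AND PROOFS =====

-- A's pair-accumulator loop computes the two filtered key lists (appended to the accumulator).
theorem pv_fold_filter (p : String → Bool) (l : List (String × Int))
    (xs ys : List String) :
    l.foldl (fun (acc : List String × List String) kv =>
        if p kv.1 then (acc.1 ++ [kv.1], acc.2) else (acc.1, acc.2 ++ [kv.1])) (xs, ys)
      = (xs ++ (l.map Prod.fst).filter p, ys ++ (l.map Prod.fst).filter (fun k => !(p k))) := by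
  induction l generalizing xs ys with
  | nil => simp
  | cons kv t ih =>
    by_cases h : p kv.1 = true <;> simp [List.foldl_cons, h, ih]

-- with distinct keys, building the dict keeps the pairs as they are
theorem pv_items_ofList (prt : List (String × Int)) (h : (prt.map Prod.fst).Nodup) :
    (PySem.Dict.ofList prt).items = prt := by
  have hfresh : ∀ a ∈ prt, (PySem.Dict.empty : PySem.Dict String Int).contains a.1 = false := by
    intro a _; simp [PySem.Dict.contains_empty]
  have := PySem.Dict.items_foldl_insert_fresh prt Prod.fst Prod.snd
      (PySem.Dict.empty : PySem.Dict String Int) hfresh h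
  simpa [PySem.Dict.ofList, PySem.Dict.update, PySem.Dict.empty] using this

-- with distinct keys, find? on the association list returns the pair itself
theorem pv_find (l : List (String × Int)) (h : (l.map Prod.fst).Nodup)
    (kv : String × Int) (hm : kv ∈ l) :
    l.find? (fun p => p.1 == kv.1) = some kv := by
  induction l with
  | nil => cases hm
  | cons p t ih =>
    rw [List.map_cons, List.nodup_cons] at h
    rcases List.mem_cons.mp hm with rfl | hm'
    · simp [List.find?]
    · have hne : ¬(p.1 == kv.1) = true := by
        simp only [beq_iff_eq]
        intro he
        exact h.1 (he ▸ List.mem_map_of_mem hm')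
      simp only [List.find?, hne]
      exact ih h.2 hm'

-- with distinct keys, the dict lookup of a pair's key gives that pair's value
theorem pv_getD_of_mem (prt : List (String × Int)) (h : (prt.map Prod.fst).Nodup)
    (kv : String × Int) (hm : kv ∈ prt) :
    PySem.Dict.getD (PySem.Dict.ofList prt) kv.1 (0 : Int) = kv.2 := by
  simp [PySem.Dict.getD, PySem.Dict.get?, pv_items_ofList prt h, pv_find prt h kv hm]

theorem pvMerge_perm (a b : List String) : (pvMerge a b).Perm (a ++ b) := by
  fun_induction pvMerge a b with
  | case1 b => simp
  | case2 x xs => simp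
  | case3 x xs y ys h ih =>
    exact (ih.cons y).trans (List.perm_middle (a := y) (l₁ := x :: xs) (l₂ := ys)).symm
  | case4 x xs y ys h ih =>
    exact ih.cons x

theorem pvMerge_mem (a b : List String) (z : String) :
    z ∈ pvMerge a b ↔ z ∈ a ∨ z ∈ b := by
  rw [(pvMerge_perm a b).mem_iff]; simp

theorem pvMerge_pairwise (a b : List String)
    (ha : a.Pairwise (· ≤ ·)) (hb : b.Pairwise (· ≤ ·)) :
    (pvMerge a b).Pairwise (· ≤ ·) := by
  fun_induction pvMerge a b with
  | case1 b => simpa using hb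
  | case2 x xs => simpa using ha
  | case3 x xs y ys h ih =>
    rw [List.pairwise_cons] at hb
    refine List.pairwise_cons.mpr ⟨?_, ih ha hb.2⟩
    intro z hz
    rcases (pvMerge_mem _ _ z).mp hz with hz | hz
    · rcases List.mem_cons.mp hz with hz | hz
      · exact hz ▸ le_of_lt h
      · exact le_trans (le_of_lt h) ((List.pairwise_cons.mp ha).1 z hz)
    · exact hb.1 z hz
  | case4 x xs y ys h ih =>
    rw [List.pairwise_cons] at ha
    refine List.pairwise_cons.mpr ⟨?_, ih ha.2 hb⟩
    intro z hz
    rcases (pvMerge_mem _ _ z).mp hz with hz | hz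
    · exact ha.1 z hz
    · rcases List.mem_cons.mp hz with hz | hz
      · exact hz ▸ not_lt.mp h
      · exact le_trans (not_lt.mp h) ((List.pairwise_cons.mp hb).1 z hz)

theorem pvGroups_perm (l : List (String × Int)) :
    (pvGroups l).1.Perm ((l.filter (fun kv => kv.2 == 0)).map Prod.fst) ∧
    (pvGroups l).2.Perm ((l.filter (fun kv => !(kv.2 == 0))).map Prod.fst) := by
  fun_induction pvGroups l with
  | case1 => simp
  | case2 kv h => simp [h]
  | case3 kv h => simp [h]
  | case4 a b rest items mid lp rp ih1 ih2 =>
    constructor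
    · refine (pvMerge_perm _ _).trans ((ih1.1.append ih2.1).trans ?_)
      rw [← List.map_append, ← List.filter_append, List.take_append_drop]
    · refine (pvMerge_perm _ _).trans ((ih1.2.append ih2.2).trans ?_)
      rw [← List.map_append, ← List.filter_append, List.take_append_drop]

theorem pvGroups_pairwise (l : List (String × Int)) :
    (pvGroups l).1.Pairwise (· ≤ ·) ∧ (pvGroups l).2.Pairwise (· ≤ ·) := by
  fun_induction pvGroups l with
  | case1 => simp
  | case2 kv h => simp
  | case3 kv h => simp
  | case4 a b rest items mid lp rp ih1 ih2 =>
    exact ⟨pvMerge_pairwise _ _ ih1.1 ih2.1, pvMerge_pairwise _ _ ih1.2 ih2.2⟩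

-- ===== VERDICT (by name: the statement is the Claim_ definition above) =====
theorem partitionToStr_spec : Claim_equal_partitionToStr := by
  intro prt _ hpre
  unfold Spec_partitionToStr partitionToStr partitionToStr_alt
  rw [pv_fold_filter (fun k => PySem.Dict.getD (PySem.Dict.ofList prt) k (0 : Int) == 0) prt [] []]
  have hf : ∀ q : Int → Bool,
      (prt.map Prod.fst).filter (fun k => q (PySem.Dict.getD (PySem.Dict.ofList prt) k (0 : Int)))
        = (prt.filter (fun kv => q kv.2)).map Prod.fst := by
    intro q
    rw [List.filter_map]
    congr 1
    apply List.filter_congr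
    intro kv hm
    simp [pv_getD_of_mem prt hpre kv hm]
  have hf0 := hf (fun v => v == 0)
  have hf1 := hf (fun v => !(v == 0))
  have h0 := PySem.List.sorted_id_eq_of_perm_of_pairwise _ _ (pvGroups_perm prt).1 (pvGroups_pairwise prt).1
  have h1 := PySem.List.sorted_id_eq_of_perm_of_pairwise _ _ (pvGroups_perm prt).2 (pvGroups_pairwise prt).2
  simp only [List.nil_append, hf0, hf1, h0, h1]
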